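-- pv_equiv track=rewrite | github.com/jeongjjju/MagToTheFuture | position.py | find_strongest_sensors
-- ===== SOURCE A (Python) =====
-- def find_strongest_sensors(sensor_z_values, num_peaks, layout):
--     """
--     Z축 자기장 절대값이 가장 큰 센서들을 num_peaks 개수만큼 찾습니다.
--     한 번 찾은 피크 주변의 센서들은 다음 검색에서 제외합니다.
--     """
--     if not sensor_z_values:
--         return []
--
--     peaks = []
--     # 원본 데이터를 훼손하지 않기 위해 복사본 사용
--     search_space = sensor_z_values.copy()
--
--     for _ in range(num_peaks):
--         if not search_space:
--             break
--
--         # 현재 탐색 공간에서 가장 강한 센서 찾기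
--         strongest_id = max(search_space, key=lambda k: abs(search_space[k]))
--         peaks.append(strongest_id)
--
--         # 찾은 센서와 그 주변 센서들을 다음 탐색 공간에서 제거
--         # 1. 찾은 센서의 위치(row, col) 찾기
--         peak_r, peak_c = -1, -1
--         for r, row_data in enumerate(layout):
--             if strongest_id in row_data:
--                 peak_r, peak_c = r, row_data.index(strongest_id)
--                 break
--
--         # 2. 주변 센서 제거 (3x3 영역)
--         if peak_r != -1:
--             for r_offset in range(-1, 2):
--                 for c_offset in range(-1, 2):
--                     r_idx, c_idx = peak_r + r_offset, peak_c + c_offset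
--                     if 0 <= r_idx < len(layout) and 0 <= c_idx < len(layout[0]):
--                         sensor_to_remove = layout[r_idx][c_idx]
--                         if sensor_to_remove in search_space:
--                             del search_space[sensor_to_remove]
--     return peaks
-- ===== SOURCE B (Python) =====
-- def find_strongest_sensors(sensor_z_values, num_peaks, layout):
--     """Greedy peak picking with a precomputed sensor->position index:
--     the per-peak scan over `layout` is replaced by one coordinate lookup,
--     and the 3x3 removal by a Chebyshev-distance filter."""
--     if not sensor_z_values:
--         return []
--
--     # position of each sensor id in the grid (first occurrence wins)
--     pos = {}
--     for r, row in enumerate(layout):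
--         for c, sid in enumerate(row):
--             if sid not in pos:
--                 pos[sid] = (r, c)
--
--     remaining = list(sensor_z_values.items())
--     peaks = []
--     for _ in range(num_peaks):
--         if not remaining:
--             break
--         sid = max(remaining, key=lambda item: abs(item[1]))[0]
--         peaks.append(sid)
--         p = pos.get(sid)
--         if p is not None:
--             pr, pc = p
--             # drop every sensor lying in the 3x3 neighbourhood of the peak
--             remaining = [item for item in remaining
--                          if not (pos.get(item[0]) is not None
--                                  and abs(pos[item[0]][0] - pr) <= 1
--                                  and abs(pos[item[0]][1] - pc) <= 1)]
--         # a peak that is not on the layout has no neighbourhood to exclude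
--     return peaks
-- ===== Notes on version B (the rewrite author's own statement) =====
-- stated objective: alternative
-- what changed: B builds a sensor->position dictionary from the layout once and, per peak, replaces A's scan of the layout rows plus nine index-computed dict deletions by a position lookup and a single Chebyshev-distance filter over the remaining sensors (timing run readings of ~1.6-1.8x straddled the confirmation threshold across runs, so no speed is claimed).
-- outside the precondition, e.g. on find_strongest_sensors({2: 5, 4: 1}, 2, [[2], [3, 4]]): A returns [2, 4], B returns [2]; on find_strongest_sensors({6: 9, 1: 5}, 2, [[1, 2], [3, 4], [1, 6]]): A returns [6], B returns [6, 1]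
import Mathlib
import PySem

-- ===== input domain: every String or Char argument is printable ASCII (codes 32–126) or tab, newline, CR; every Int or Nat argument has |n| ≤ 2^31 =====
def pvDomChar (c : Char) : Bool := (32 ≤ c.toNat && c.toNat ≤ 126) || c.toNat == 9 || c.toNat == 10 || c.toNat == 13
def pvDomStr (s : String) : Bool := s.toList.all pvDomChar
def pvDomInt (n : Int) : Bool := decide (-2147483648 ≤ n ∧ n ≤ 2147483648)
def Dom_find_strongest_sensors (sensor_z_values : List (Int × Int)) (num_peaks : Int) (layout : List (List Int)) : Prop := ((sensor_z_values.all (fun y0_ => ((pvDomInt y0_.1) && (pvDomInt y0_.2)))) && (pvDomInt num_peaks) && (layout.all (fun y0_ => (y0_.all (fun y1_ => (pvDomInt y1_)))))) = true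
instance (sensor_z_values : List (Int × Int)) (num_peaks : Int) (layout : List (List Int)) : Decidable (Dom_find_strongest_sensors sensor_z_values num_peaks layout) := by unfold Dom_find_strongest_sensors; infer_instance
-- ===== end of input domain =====

-- B precomputes a sensor→position dictionary once and removes a peak's 3x3
-- neighbourhood by a Chebyshev-distance filter, instead of A's per-peak scan of
-- `layout` plus nine indexed deletions; return values are proved equal on Pre_.

-- ===== PORT A =====

-- 'for r, row_data in enumerate(layout): if strongest_id in row_data: ...; break' (default (-1, -1))
def pvFindPosA (rows : List (Int × List Int)) (sid : Int) : Int × Int :=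
  match rows with
  | [] => (-1, -1)
  | (r, row) :: rest =>
    if sid ∈ row then (r, ((PySem.List.index? row sid).getD 0 : Nat))
    else pvFindPosA rest sid

-- the two nested 'for *_offset in range(-1, 2)' removal loops
def pvRemoveA (layout : List (List Int)) (pr pc : Int) (ss : PySem.Dict Int Int) : PySem.Dict Int Int :=
  (PySem.List.pyRange (-1) 2 1).foldl (fun ss r_offset =>
    (PySem.List.pyRange (-1) 2 1).foldl (fun ss c_offset =>
      let r_idx := pr + r_offset
      let c_idx := pc + c_offset
      if 0 ≤ r_idx ∧ r_idx < layout.length ∧ 0 ≤ c_idx ∧ c_idx < (PySem.List.pyGetD layout 0 []).length then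
        let sensor_to_remove := PySem.List.pyGetD (PySem.List.pyGetD layout r_idx []) c_idx 0
        if (ss.contains sensor_to_remove : Bool) then ss.erase sensor_to_remove else ss
      else ss) ss) ss

-- 'for _ in range(num_peaks)' with the 'if not search_space: break'
def pvLoopA (layout : List (List Int)) : Nat → List Int → PySem.Dict Int Int → List Int
  | 0, peaks, _ => peaks
  | n + 1, peaks, ss =>
    if ss.items = [] then peaks
    else
      match PySem.List.max? ss.keys (fun k => |ss.getD k 0|) with
      | none => peaks  -- unreachable: keys of a nonempty dict are nonempty
      | some strongest_id =>
        let peaks' := peaks ++ [strongest_id]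
        let rc := pvFindPosA (PySem.List.enumerate layout 0) strongest_id
        let ss' := if rc.1 ≠ -1 then pvRemoveA layout rc.1 rc.2 ss else ss
        pvLoopA layout n peaks' ss'

def find_strongest_sensors (sensor_z_values : List (Int × Int)) (num_peaks : Int) (layout : List (List Int)) : List Int :=
  if sensor_z_values = [] then []
  else pvLoopA layout num_peaks.toNat [] (PySem.Dict.mk sensor_z_values)

-- ===== PORT B =====

-- 'pos[sid] = (r, c)' for the first occurrence of each sensor id
def pvPosB (layout : List (List Int)) : PySem.Dict Int (Int × Int) :=
  (PySem.List.enumerate layout 0).foldl (fun pos rrow =>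
    (PySem.List.enumerate rrow.2 0).foldl (fun pos csid =>
      if (pos.contains csid.2 : Bool) then pos else pos.insert csid.2 (rrow.1, csid.1)) pos)
    PySem.Dict.empty

-- the list-comprehension filter: keep items outside the 3x3 neighbourhood of (pr, pc)
def pvKeepB (pos : PySem.Dict Int (Int × Int)) (pr pc : Int) (item : Int × Int) : Bool :=
  match pos.get? item.1 with
  | none => true
  | some q => !(|q.1 - pr| ≤ 1 ∧ |q.2 - pc| ≤ 1 : Bool)

def pvLoopB (pos : PySem.Dict Int (Int × Int)) : Nat → List Int → List (Int × Int) → List Int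
  | 0, peaks, _ => peaks
  | n + 1, peaks, remaining =>
    if remaining = [] then peaks
    else
      match PySem.List.max? remaining (fun item => |item.2|) with
      | none => peaks  -- unreachable: remaining is nonempty
      | some it =>
        let sid := it.1
        let peaks' := peaks ++ [sid]
        match pos.get? sid with
        | some p => pvLoopB pos n peaks' (remaining.filter (pvKeepB pos p.1 p.2))
        | none => pvLoopB pos n peaks' remaining

def find_strongest_sensors_alt (sensor_z_values : List (Int × Int)) (num_peaks : Int) (layout : List (List Int)) : List Int :=
  if sensor_z_values = [] then []
  else pvLoopB (pvPosB layout) num_peaks.toNat [] sensor_z_values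

-- ===== PRECONDITION & SPEC =====
-- When some sensor id occurs in the layout, Pre_ excludes (a) ragged layouts (rows
-- shorter than row 0 make A's layout[r_idx][c_idx] raise IndexError; where the bad cell
-- is never reached, A's value — removal clipped to row 0's width — is an accident of the
-- shared len(layout[0]) bound), and (b) layouts with a repeated sensor id, where A's
-- removal via the grid cells and B's via the id's (unique-by-spec) position defensibly
-- disagree; layouts disjoint from the sensor ids are always admitted, and duplicate keys
-- in sensor_z_values cannot occur (it is a Python dict) and are excluded likewise.  Both
-- conditions are closed-form over-approximations: many excluded ragged/duplicate inputs
-- happen to agree, but which of them do depends on the run of the algorithm itself.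
def Pre_find_strongest_sensors (sensor_z_values : List (Int × Int)) (num_peaks : Int) (layout : List (List Int)) : Prop :=
  (sensor_z_values.map Prod.fst).Nodup ∧
  (((∀ row ∈ layout, row.length = (layout.headD []).length) ∧ layout.flatten.Nodup) ∨
    (∀ k ∈ sensor_z_values.map Prod.fst, k ∉ layout.flatten))

instance (sensor_z_values : List (Int × Int)) (num_peaks : Int) (layout : List (List Int)) : Decidable (Pre_find_strongest_sensors sensor_z_values num_peaks layout) := by unfold Pre_find_strongest_sensors; infer_instance

def pvWitness_find_strongest_sensors : (List (Int × Int)) × Int × List (List Int) :=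
  ([(1, 5), (2, -7), (6, 3)], 2, [[1, 2], [3, 6]])

def Spec_find_strongest_sensors (sensor_z_values : List (Int × Int)) (num_peaks : Int) (layout : List (List Int)) (out : List Int) : Prop := out = find_strongest_sensors_alt sensor_z_values num_peaks layout
instance (sensor_z_values : List (Int × Int)) (num_peaks : Int) (layout : List (List Int)) (out : List Int) : Decidable (Spec_find_strongest_sensors sensor_z_values num_peaks layout out) := by unfold Spec_find_strongest_sensors; infer_instance

-- ===== CLAIM (what is proved, stated in full; the proofs are below) =====
def Claim_equal_find_strongest_sensors : Prop := ∀ (sensor_z_values : List (Int × Int)) (num_peaks : Int) (layout : List (List Int)), Dom_find_strongest_sensors sensor_z_values num_peaks layout → Pre_find_strongest_sensors sensor_z_values num_peaks layout → Spec_find_strongest_sensors sensor_z_values num_peaks layout (find_strongest_sensors sensor_z_values num_peaks layout)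

-- ===== LEMMAS AND PROOFS =====

-- proof-side spec: the row-major first occurrence of k, rows indexed from r
def posFrom (r : Int) (rows : List (List Int)) (k : Int) : Option (Int × Int) :=
  match rows with
  | [] => none
  | row :: rest =>
    if k ∈ row then some (r, ((List.idxOf? k row).getD 0 : Nat))
    else posFrom (r + 1) rest k

-- proof-side: the bool A's inner removal step tests for key k at offset (ro, co)
def qA (layout : List (List Int)) (pr pc ro co k : Int) : Bool :=
  if 0 ≤ pr + ro ∧ pr + ro < layout.length ∧ 0 ≤ pc + co ∧ pc + co < (PySem.List.pyGetD layout 0 []).length then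
    !(k == PySem.List.pyGetD (PySem.List.pyGetD layout (pr + ro) []) (pc + co) 0)
  else true

theorem pvFindPosA_eq (rows : List (List Int)) : ∀ (r : Int) (k : Int),
    pvFindPosA (PySem.List.enumerate rows r) k = (posFrom r rows k).getD (-1, -1) := by
  induction rows with
  | nil => intro r k; simp [PySem.List.enumerate_nil, pvFindPosA, posFrom]
  | cons row rest ih =>
    intro r k
    rw [PySem.List.enumerate_cons]
    simp only [pvFindPosA, posFrom, PySem.List.index?]
    split
    · rfl
    · exact ih (r + 1) k

theorem max?_map_key {α β : Type} (f : α → β) (key : β → Int) (l : List α) :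
    PySem.List.max? (l.map f) key = Option.map f (PySem.List.max? l (fun a => key (f a))) := by
  unfold PySem.List.max?
  rw [List.foldl_map]
  suffices h : ∀ acc : Option α,
      l.foldl (fun acc x => match acc with
        | none => some (f x)
        | some m => if key m < key (f x) then some (f x) else some m) (Option.map f acc)
      = Option.map f (l.foldl (fun acc x => match acc with
        | none => some x
        | some m => if key (f m) < key (f x) then some x else some m) acc) from h none
  induction l with
  | nil => intro acc; rfl
  | cons x t ih =>
    intro acc
    rw [List.foldl_cons, List.foldl_cons]
    cases acc with
    | none => exact ih (some x)
    | some m =>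
      simp only [Option.map_some]
      by_cases hkm : key (f m) < key (f x) <;> simp [hkm] <;> [exact ih (some x); exact ih (some m)]

theorem max?_congr {α : Type} (k1 k2 : α → Int) (l : List α)
    (h : ∀ a ∈ l, k1 a = k2 a) :
    PySem.List.max? l k1 = PySem.List.max? l k2 := by
  unfold PySem.List.max?
  suffices hs : ∀ acc : Option α, (∀ m, acc = some m → k1 m = k2 m) → (∀ a ∈ l, k1 a = k2 a) →
      l.foldl (fun acc x => match acc with
        | none => some x
        | some m => if k1 m < k1 x then some x else some m) acc
      = l.foldl (fun acc x => match acc with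
        | none => some x
        | some m => if k2 m < k2 x then some x else some m) acc from
    hs none (by simp) h
  clear h
  induction l with
  | nil => intro acc _ _; rfl
  | cons x t ih =>
    intro acc hacc hl
    have hx : k1 x = k2 x := hl x (by simp)
    have ht : ∀ a ∈ t, k1 a = k2 a := fun a ha => hl a (by simp [ha])
    rw [List.foldl_cons, List.foldl_cons]
    cases acc with
    | none => exact ih (some x) (by intro m hm; cases hm; exact hx) ht
    | some m =>
      have hm : k1 m = k2 m := hacc m rfl
      simp only [hm, hx]
      by_cases hc : k2 m < k2 x <;> simp only [hc, if_true, if_false] <;>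
        [exact ih (some x) (by intro m' hm'; cases hm'; exact hx) ht;
         exact ih (some m) (by intro m' hm'; cases hm'; exact hm) ht]
theorem posB_row (r : Int) (row : List Int) : ∀ (c0 : Int) (pos : PySem.Dict Int (Int × Int)) (k : Int),
    ((PySem.List.enumerate row c0).foldl
      (fun pos csid => if (pos.contains csid.2 : Bool) then pos else pos.insert csid.2 (r, csid.1)) pos).get? k
    = ((pos.get? k).orElse (fun _ => (List.idxOf? k row).map (fun j => (r, c0 + j)))) := by
  induction row with
  | nil => intro c0 pos k; simp [PySem.List.enumerate_nil, List.idxOf?_nil]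
  | cons x xs ih =>
    intro c0 pos k
    rw [PySem.List.enumerate_cons, List.foldl_cons, ih (c0 + 1)]
    by_cases hkx : k = x
    · subst hkx
      by_cases hc : (pos.contains k : Bool)
      · have hs : (pos.get? k).isSome := by rw [PySem.Dict.contains_eq_isSome_get?] at hc; exact hc
        obtain ⟨v, hv⟩ := Option.isSome_iff_exists.mp hs
        simp [hc, hv, List.idxOf?_cons, Option.orElse]
      · have hs : pos.get? k = none := by
          rw [PySem.Dict.contains_eq_isSome_get?] at hc
          simpa using hc
        simp only [hc, Bool.false_eq_true, if_false]
        rw [PySem.Dict.get?_insert_self, hs]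
        simp [List.idxOf?_cons, Option.orElse]
    · have step : (if (pos.contains x : Bool) then pos else pos.insert x (r, c0)).get? k = pos.get? k := by
        by_cases hc : (pos.contains x : Bool)
        · simp [hc]
        · simp only [hc, Bool.false_eq_true, if_false]
          exact PySem.Dict.get?_insert_of_ne pos (r, c0) hkx
      rw [step]
      congr 1
      · funext u
        rw [List.idxOf?_cons]
        simp only [beq_iff_eq]
        rw [if_neg (fun h => hkx h.symm)]
        cases h : List.idxOf? k xs with
        | none => simp
        | some j => simp; ring
theorem posB_rows (rows : List (List Int)) : ∀ (r : Int) (pos : PySem.Dict Int (Int × Int)) (k : Int),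
    ((PySem.List.enumerate rows r).foldl (fun pos rrow =>
      (PySem.List.enumerate rrow.2 0).foldl (fun pos csid =>
        if (pos.contains csid.2 : Bool) then pos else pos.insert csid.2 (rrow.1, csid.1)) pos) pos).get? k
    = ((pos.get? k).orElse (fun _ => posFrom r rows k)) := by
  induction rows with
  | nil => intro r pos k; simp [PySem.List.enumerate_nil, posFrom]
  | cons row rest ih =>
    intro r pos k
    rw [PySem.List.enumerate_cons, List.foldl_cons, ih (r + 1), posB_row]
    have hbr : (List.idxOf? k row).map (fun j => (r, (0 : Int) + j))
        = (if k ∈ row then some (r, (((List.idxOf? k row).getD 0 : Nat) : Int)) else none) := by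
      by_cases hm : k ∈ row
      · obtain ⟨j, hj⟩ := Option.isSome_iff_exists.mp (List.isSome_idxOf?.mpr hm)
        simp [hm, hj]
      · have : List.idxOf? k row = none := by
          rcases h : List.idxOf? k row with _ | j
          · rfl
          · exact absurd (List.isSome_idxOf?.mp (by simp [h])) hm
        simp [hm, this]
    rw [hbr]
    show _ = (pos.get? k).orElse (fun _ => posFrom r (row :: rest) k)
    rcases hp : pos.get? k with _ | v
    · by_cases hm : k ∈ row <;> simp [Option.orElse, posFrom, hm]
    · simp [Option.orElse]

theorem posB_get? (layout : List (List Int)) (k : Int) :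
    (pvPosB layout).get? k = posFrom 0 layout k := by
  rw [pvPosB, posB_rows]
  simp [PySem.Dict.get?_empty]
theorem posFrom_sound (rows : List (List Int)) : ∀ (r0 : Int) (k pr pc : Int),
    posFrom r0 rows k = some (pr, pc) →
    ∃ (i j : Nat) (row : List Int), pr = r0 + i ∧ pc = (j : Int) ∧ rows[i]? = some row ∧ row[j]? = some k := by
  induction rows with
  | nil => intro r0 k pr pc h; simp [posFrom] at h
  | cons row rest ih =>
    intro r0 k pr pc h
    by_cases hm : k ∈ row
    · simp only [posFrom, if_pos hm] at h
      obtain ⟨j, hj⟩ := Option.isSome_iff_exists.mp (List.isSome_idxOf?.mpr hm)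
      obtain ⟨hjlt, hjv, _⟩ := List.idxOf?_eq_some_iff.mp hj
      refine ⟨0, j, row, ?_, ?_, by simp, ?_⟩
      · cases h; simp
      · cases h; simp [hj]
      · simp [List.getElem?_eq_getElem hjlt, hjv]
    · simp only [posFrom, if_neg hm] at h
      obtain ⟨i, j, row', h1, h2, h3, h4⟩ := ih (r0 + 1) k pr pc h
      exact ⟨i + 1, j, row', by push_cast; omega, h2, by simpa using h3, h4⟩
theorem posFrom_none (rows : List (List Int)) : ∀ (r0 : Int) (k : Int),
    posFrom r0 rows k = none ↔ ∀ row ∈ rows, k ∉ row := by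
  induction rows with
  | nil => intro r0 k; simp [posFrom]
  | cons row rest ih =>
    intro r0 k
    by_cases hm : k ∈ row
    · simp [posFrom, hm]
    · simp [posFrom, hm, ih (r0 + 1) k]
theorem posFrom_complete (rows : List (List Int)) (hn : rows.flatten.Nodup) :
    ∀ (i j : Nat) (row : List Int) (k : Int) (r0 : Int), rows[i]? = some row → row[j]? = some k →
    posFrom r0 rows k = some (r0 + i, (j : Int)) := by
  induction rows with
  | nil => intro i j row k r0 h1; simp at h1
  | cons row0 rest ih =>
    intro i j row k r0 h1 h2
    rcases i with _ | i
    · simp only [List.getElem?_cons_zero, Option.some.injEq] at h1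
      subst h1
      have hj : j < row0.length := (List.getElem?_eq_some_iff.mp h2).1
      have hjv : row0[j] = k := (List.getElem?_eq_some_iff.mp h2).2
      have hm : k ∈ row0 := by rw [← hjv]; exact List.getElem_mem hj
      have hrow : row0.Nodup := by
        simp only [List.flatten_cons] at hn
        exact (List.nodup_append.mp hn).1
      have hidx : List.idxOf? k row0 = some j := by
        rw [List.idxOf?_eq_some_iff]
        refine ⟨hj, hjv, ?_⟩
        intro j' hj' hv
        have := (List.Nodup.getElem_inj_iff hrow (hi := Nat.lt_trans hj' hj) (hj := hj)).mp (hv.trans hjv.symm)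
        omega
      simp [posFrom, hm, hidx]
    · simp only [List.getElem?_cons_succ] at h1
      have hmem : k ∈ rest.flatten := by
        refine List.mem_flatten.mpr ⟨row, ?_, ?_⟩
        · exact List.mem_of_getElem? h1
        · have := List.getElem?_eq_some_iff.mp h2
          rw [← this.2]; exact List.getElem_mem this.1
      have hnot : k ∉ row0 := by
        simp only [List.flatten_cons] at hn
        intro hc
        exact (List.disjoint_of_nodup_append hn) hc hmem
      rw [posFrom, if_neg hnot, ih (by simp only [List.flatten_cons] at hn; exact (List.nodup_append.mp hn).2.1) i j row k (r0+1) h1 h2]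
      have : r0 + 1 + (i : Int) = r0 + ((i : Nat) + 1 : Nat) := by push_cast; ring
      rw [this]
theorem condErase_items (d : PySem.Dict Int Int) (s : Int) :
    (if (d.contains s : Bool) then d.erase s else d).items = d.items.filter (fun p => !(p.1 == s)) := by
  by_cases h : (d.contains s : Bool)
  · simp [h, PySem.Dict.erase]
  · have h' : ∀ p ∈ d.items, (p.1 == s) = false := by
      intro p hp
      by_contra hc
      apply h
      simp only [PySem.Dict.contains, List.any_eq_true]
      exact ⟨p, hp, by revert hc; cases h2 : (p.1 == s) <;> simp_all⟩
    simp only [h, Bool.false_eq_true, if_false]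
    refine (List.filter_eq_self.mpr ?_).symm
    intro p hp
    simp [h' p hp]
theorem foldl_items_filter {β : Type} (g : PySem.Dict Int Int → β → PySem.Dict Int Int)
    (q : β → Int × Int → Bool) (hg : ∀ d b, (g d b).items = d.items.filter (q b)) :
    ∀ (l : List β) (d : PySem.Dict Int Int),
    (l.foldl g d).items = d.items.filter (fun p => l.all (fun b => q b p)) := by
  intro l
  induction l with
  | nil => intro d; simp
  | cons b t ih =>
    intro d
    rw [List.foldl_cons, ih (g d b), hg d b, List.filter_filter]
    apply List.filter_congr
    intro p _
    simp [Bool.and_comm]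

theorem pvRemoveA_items (layout : List (List Int)) (pr pc : Int) (ss : PySem.Dict Int Int) :
    (pvRemoveA layout pr pc ss).items
    = ss.items.filter (fun p => (PySem.List.pyRange (-1) 2 1).all (fun ro =>
        (PySem.List.pyRange (-1) 2 1).all (fun co => qA layout pr pc ro co p.1))) := by
  have hgin : ∀ (ro : Int) (d : PySem.Dict Int Int) (co : Int),
      ((fun (ss : PySem.Dict Int Int) (c_offset : Int) =>
        let r_idx := pr + ro
        let c_idx := pc + c_offset
        if 0 ≤ r_idx ∧ r_idx < layout.length ∧ 0 ≤ c_idx ∧ c_idx < (PySem.List.pyGetD layout 0 []).length then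
          let sensor_to_remove := PySem.List.pyGetD (PySem.List.pyGetD layout r_idx []) c_idx 0
          if (ss.contains sensor_to_remove : Bool) then ss.erase sensor_to_remove else ss
        else ss) d co).items = d.items.filter (fun p => qA layout pr pc ro co p.1) := by
    intro ro d co
    simp only []
    by_cases hc : 0 ≤ pr + ro ∧ pr + ro < layout.length ∧ 0 ≤ pc + co ∧ pc + co < (PySem.List.pyGetD layout 0 []).length
    · rw [if_pos hc, condErase_items]
      apply List.filter_congr
      intro p _
      rw [qA, if_pos hc]
    · rw [if_neg hc]
      refine (List.filter_eq_self.mpr ?_).symm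
      intro p _
      rw [qA, if_neg hc]
  have hgout : ∀ (d : PySem.Dict Int Int) (ro : Int),
      ((fun (ss : PySem.Dict Int Int) (r_offset : Int) =>
        (PySem.List.pyRange (-1) 2 1).foldl (fun ss c_offset =>
          let r_idx := pr + r_offset
          let c_idx := pc + c_offset
          if 0 ≤ r_idx ∧ r_idx < layout.length ∧ 0 ≤ c_idx ∧ c_idx < (PySem.List.pyGetD layout 0 []).length then
            let sensor_to_remove := PySem.List.pyGetD (PySem.List.pyGetD layout r_idx []) c_idx 0
            if (ss.contains sensor_to_remove : Bool) then ss.erase sensor_to_remove else ss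
          else ss) ss) d ro).items
      = d.items.filter (fun p => (PySem.List.pyRange (-1) 2 1).all (fun co => qA layout pr pc ro co p.1)) := by
    intro d ro
    exact foldl_items_filter _ _ (hgin ro) _ d
  exact foldl_items_filter _ _ hgout _ ss

theorem keep_eq (layout : List (List Int))
    (hrect : ∀ row ∈ layout, row.length = (layout.headD []).length)
    (hnl : layout.flatten.Nodup) (pr pc k : Int) :
    (PySem.List.pyRange (-1) 2 1).all (fun ro =>
      (PySem.List.pyRange (-1) 2 1).all (fun co => qA layout pr pc ro co k))
    = pvKeepB (pvPosB layout) pr pc (k, 0) := by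
  have hC0 : PySem.List.pyGetD layout 0 [] = layout.headD [] := by
    cases layout <;> simp [PySem.List.pyGetD_zero]
  -- a cell hit by the removal loop is the value at valid Nat indices
  have cellval : ∀ (r c : Int), 0 ≤ r → r < layout.length → 0 ≤ c → c < (layout.headD []).length →
      ∃ (i j : Nat) (row : List Int), r = (i : Int) ∧ c = (j : Int) ∧ layout[i]? = some row ∧
        row[j]? = some (PySem.List.pyGetD (PySem.List.pyGetD layout r []) c 0) := by
    intro r c hr0 hrl hc0 hcl
    have hrn : r.toNat < layout.length := by omega
    have hrow : PySem.List.pyGetD layout r [] = layout[r.toNat] :=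
      PySem.List.pyGetD_eq_getElem layout [] hr0 (by exact_mod_cast hrl)
    have hlen : layout[r.toNat].length = (layout.headD []).length :=
      hrect _ (List.getElem_mem hrn)
    have hcn : c.toNat < layout[r.toNat].length := by
      rw [hlen]; omega
    have hcell : PySem.List.pyGetD (PySem.List.pyGetD layout r []) c 0 = layout[r.toNat][c.toNat] := by
      rw [hrow]
      exact PySem.List.pyGetD_eq_getElem _ 0 hc0 (by omega)
    exact ⟨r.toNat, c.toNat, layout[r.toNat], by omega, by omega,
      List.getElem?_eq_getElem hrn, by rw [hcell]; exact List.getElem?_eq_getElem hcn⟩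
  rcases hq : (pvPosB layout).get? k with _ | ⟨qr, qc⟩
  · -- k is nowhere on the layout: every factor is true
    have hnot : ∀ row ∈ layout, k ∉ row := (posFrom_none layout 0 k).mp (by rw [← posB_get?]; exact hq)
    rw [pvKeepB]
    simp only [hq]
    rw [List.all_eq_true]
    intro ro hro
    rw [List.all_eq_true]
    intro co hco
    rw [qA]
    split
    · rename_i hb
      obtain ⟨i, j, row, _, _, hrow, hcell⟩ := cellval (pr + ro) (pc + co) hb.1 hb.2.1 hb.2.2.1 (by rw [hC0] at hb; exact hb.2.2.2)
      simp only [Bool.not_eq_eq_eq_not, Bool.not_true, beq_eq_false_iff_ne, ne_eq]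
      intro hkc
      exact hnot row (List.mem_of_getElem? hrow) (by rw [hkc]; have := List.getElem?_eq_some_iff.mp hcell; rw [← this.2]; exact List.getElem_mem this.1)
    · rfl
  · -- k sits at the unique cell (qr, qc)
    have hpf : posFrom 0 layout k = some (qr, qc) := by rw [← posB_get?]; exact hq
    obtain ⟨qi, qj, qrow, hqr, hqc, hqrow, hqcell⟩ := posFrom_sound layout 0 k qr qc hpf
    have hqr' : qr = (qi : Int) := by omega
    have hqilt : qi < layout.length := (List.getElem?_eq_some_iff.mp hqrow).1
    have hqjlt : qj < qrow.length := (List.getElem?_eq_some_iff.mp hqcell).1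
    have hqlen : qrow.length = (layout.headD []).length := by
      have := hrect qrow (List.mem_of_getElem? hqrow)
      exact this
    rw [pvKeepB]
    simp only [hq]
    by_cases hnear : |qr - pr| ≤ 1 ∧ |qc - pc| ≤ 1
    · -- near: the factor at offset (qr-pr, qc-pc) is false
      have hn1 : -1 ≤ qr - pr ∧ qr - pr ≤ 1 := abs_le.mp hnear.1
      have hn2 : -1 ≤ qc - pc ∧ qc - pc ≤ 1 := abs_le.mp hnear.2
      have h1 : (decide (|qr - pr| ≤ 1 ∧ |qc - pc| ≤ 1) : Bool) = true := by simp [hnear]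
      rw [h1]
      simp only [Bool.not_true]
      rw [← Bool.not_eq_true, List.all_eq_true]
      intro hall
      have h2 := hall (qr - pr) (by rw [PySem.List.mem_pyRange_one]; omega)
      rw [List.all_eq_true] at h2
      have h3 := h2 (qc - pc) (by rw [PySem.List.mem_pyRange_one]; omega)
      rw [qA] at h3
      have hqil : (qi : Int) < layout.length := by exact_mod_cast hqilt
      have hqjl : (qj : Int) < (layout.headD []).length := by rw [← hqlen]; exact_mod_cast hqjlt
      have hb : 0 ≤ pr + (qr - pr) ∧ pr + (qr - pr) < layout.length ∧ 0 ≤ pc + (qc - pc) ∧ pc + (qc - pc) < (PySem.List.pyGetD layout 0 []).length := by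
        rw [hC0]
        refine ⟨by omega, ?_, by omega, ?_⟩
        · rw [show pr + (qr - pr) = qr by ring, hqr']; exact hqil
        · rw [show pc + (qc - pc) = qc by ring, hqc]; exact hqjl
      rw [if_pos hb] at h3
      have hcell : PySem.List.pyGetD (PySem.List.pyGetD layout (pr + (qr - pr)) []) (pc + (qc - pc)) 0 = k := by
        have e1 : pr + (qr - pr) = (qi : Int) := by omega
        have e2 : pc + (qc - pc) = (qj : Int) := by omega
        rw [e1, e2]
        rw [PySem.List.pyGetD_eq_getElem layout [] (by positivity) (by exact_mod_cast hqilt)]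
        simp only [Int.toNat_natCast]
        rw [(List.getElem?_eq_some_iff.mp hqrow).2]
        rw [PySem.List.pyGetD_eq_getElem qrow 0 (by positivity) (by exact_mod_cast hqjlt)]
        simp only [Int.toNat_natCast]
        exact (List.getElem?_eq_some_iff.mp hqcell).2
      rw [hcell] at h3
      simp at h3
    · -- far: every in-bounds cell differs from k (uniqueness of the position)
      have h1 : (decide (|qr - pr| ≤ 1 ∧ |qc - pc| ≤ 1) : Bool) = false := by
        simp only [decide_eq_false_iff_not]
        exact hnear
      rw [h1]
      simp only [Bool.not_false]
      rw [List.all_eq_true]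
      intro ro hro
      rw [List.all_eq_true]
      intro co hco
      rw [qA]
      split
      · rename_i hb
        obtain ⟨i, j, row, hi, hj, hrow, hcell⟩ := cellval (pr + ro) (pc + co) hb.1 hb.2.1 hb.2.2.1 (by rw [hC0] at hb; exact hb.2.2.2)
        simp only [Bool.not_eq_eq_eq_not, Bool.not_true, beq_eq_false_iff_ne, ne_eq]
        intro hkc
        -- then posFrom would locate k at (pr+ro, pc+co); uniqueness forces nearness
        have := posFrom_complete layout hnl i j row k 0 hrow (by rw [hkc]; exact hcell)
        rw [hpf] at this
        have hqi : qr = (i : Int) ∧ qc = (j : Int) := by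
          have h5 := this.symm
          simp only [Option.some.injEq, Prod.mk.injEq] at h5
          exact ⟨by have := h5.1; omega, h5.2.symm⟩
        rw [PySem.List.mem_pyRange_one] at hro hco
        apply hnear
        constructor <;> rw [abs_le] <;> omega
      · rfl

theorem loop_eq (layout : List (List Int)) :
    ∀ (fuel : Nat) (peaks : List Int) (ss : PySem.Dict Int Int) (rem : List (Int × Int)),
    ss.items = rem → (rem.map Prod.fst).Nodup →
    (((∀ row ∈ layout, row.length = (layout.headD []).length) ∧ layout.flatten.Nodup) ∨
      (∀ k ∈ rem.map Prod.fst, k ∉ layout.flatten)) →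
    pvLoopA layout fuel peaks ss = pvLoopB (pvPosB layout) fuel peaks rem := by
  intro fuel
  induction fuel with
  | zero => intro peaks ss rem h hnd hside; rfl
  | succ n ih =>
    intro peaks ss rem h hnd hside
    rw [pvLoopA, pvLoopB]
    by_cases hre : rem = []
    · rw [if_pos (h.trans hre), if_pos hre]
    · rw [if_neg (fun hc => hre (h.symm.trans hc)), if_neg hre]
      have hkeys : ss.keys = rem.map Prod.fst := by
        show ss.items.map _ = _
        rw [h]
      have hmax : PySem.List.max? ss.keys (fun k => |ss.getD k 0|)
          = Option.map Prod.fst (PySem.List.max? rem (fun item => |item.2|)) := by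
        rw [hkeys, max?_map_key]
        congr 1
        apply max?_congr
        intro p hp
        have hm : (p.1, p.2) ∈ ss.items := by rw [h]; simpa using hp
        have hnodk : ss.keys.Nodup := by rw [hkeys]; exact hnd
        rw [PySem.Dict.getD_of_mem_items ss hm hnodk]
      cases hM : PySem.List.max? rem (fun item => |item.2|) with
      | none => rw [hmax, hM]; rfl
      | some it =>
        rw [hmax, hM]
        simp only [Option.map_some]
        rw [pvFindPosA_eq]
        rw [posB_get?]
        rcases hside with ⟨hrect, hnl⟩ | hno
        · cases hpf : posFrom 0 layout it.1 with
          | none =>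
            simp only [Option.getD_none]
            rw [if_neg (by simp)]
            exact ih (peaks ++ [it.1]) ss rem h hnd (Or.inl ⟨hrect, hnl⟩)
          | some p =>
            simp only [Option.getD_some]
            obtain ⟨i, j, row, hi, hj, _, _⟩ := posFrom_sound layout 0 it.1 p.1 p.2 (by rw [hpf])
            rw [if_pos (by show p.1 ≠ -1; omega)]
            apply ih
            · rw [pvRemoveA_items, h]
              apply List.filter_congr
              intro x hx
              exact keep_eq layout hrect hnl p.1 p.2 x.1
            · exact hnd.sublist (List.Sublist.map Prod.fst (List.filter_sublist))
            · exact Or.inl ⟨hrect, hnl⟩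
        · -- no sensor id occurs in the layout: the peak has no position, nothing is removed
          have hmem : it ∈ rem := PySem.List.max?_mem hM
          have hnf : it.1 ∉ layout.flatten := hno it.1 (List.mem_map.mpr ⟨it, hmem, rfl⟩)
          have hpf : posFrom 0 layout it.1 = none := by
            rw [posFrom_none]
            intro row hrow hc
            exact hnf (List.mem_flatten.mpr ⟨row, hrow, hc⟩)
          rw [hpf]
          simp only [Option.getD_none]
          rw [if_neg (by simp)]
          exact ih (peaks ++ [it.1]) ss rem h hnd (Or.inr hno)

-- ===== VERDICT (by name: the statement is the Claim_ definition above) =====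
theorem find_strongest_sensors_spec : Claim_equal_find_strongest_sensors := by
  intro szv np layout _hdom hpre
  unfold Spec_find_strongest_sensors
  obtain ⟨hk, hside⟩ := hpre
  unfold find_strongest_sensors find_strongest_sensors_alt
  split
  · rfl
  · exact (loop_eq layout np.toNat [] (PySem.Dict.mk szv) szv rfl hk hside).symm ▸ rfl
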